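-- pv_equiv track=rewrite | github.com/siddharthpathak/MapReduce | mapper.py | inverted_combiner
-- ===== SOURCE A (Python) =====
-- def inverted_combiner(output):
--
--     output_count = {}
--     for k, v in output:
--         if k in output_count:
--             if v in output_count[k]:
--                 output_count[k][v] += 1
--             else:
--                 output_count[k][v] = 1
--         else:
--             output_count[k] = {v: 1}
--
--     result = []
--     for k, v in output_count.items():
--         temp = []
--         for k2, v2 in v.items():
--             temp.append((k2, v2))
--         result.append((k, temp))
--
--     return result
-- ===== SOURCE B (Python) =====
-- def inverted_combiner(output):
--     counts = {}
--     for pair in output: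
--         counts[pair] = counts.get(pair, 0) + 1
--     groups = {}
--     for (k, v), c in counts.items():
--         groups.setdefault(k, []).append((v, c))
--     return list(groups.items())
-- ===== Notes on version B (the rewrite author's own statement) =====
-- stated objective: alternative
-- what changed: B replaces A's nested dict-of-dicts counting loop (with membership branches) by a flat Counter over (key,value) pairs followed by a separate grouping pass with setdefault, relying on dict insertion order.
import Mathlib
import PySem

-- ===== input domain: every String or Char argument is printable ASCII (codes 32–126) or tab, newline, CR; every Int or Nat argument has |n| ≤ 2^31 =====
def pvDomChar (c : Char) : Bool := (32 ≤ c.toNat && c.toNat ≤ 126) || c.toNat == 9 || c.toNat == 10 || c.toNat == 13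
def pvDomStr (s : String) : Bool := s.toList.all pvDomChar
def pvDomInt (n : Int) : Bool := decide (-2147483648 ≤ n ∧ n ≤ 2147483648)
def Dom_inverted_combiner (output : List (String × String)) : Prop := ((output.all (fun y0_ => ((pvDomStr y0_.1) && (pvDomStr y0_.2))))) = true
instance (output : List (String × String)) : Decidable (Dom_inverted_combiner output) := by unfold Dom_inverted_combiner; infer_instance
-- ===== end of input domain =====

-- B builds a flat Counter over (key,value) pairs and then groups it per key in a second
-- pass, instead of A's nested dict-of-dicts with membership branches; objective: alternative.

-- ===== PORT A =====
def inverted_combiner (output : List (String × String)) : List (String × (List (String × Int))) :=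
  let output_count : PySem.Dict String (PySem.Dict String Int) :=
    output.foldl (fun d p =>
      if d.contains p.1 then
        if (d.getD p.1 PySem.Dict.empty).contains p.2 then
          d.insert p.1 ((d.getD p.1 PySem.Dict.empty).insert p.2
            ((d.getD p.1 PySem.Dict.empty).getD p.2 0 + 1))
        else
          d.insert p.1 ((d.getD p.1 PySem.Dict.empty).insert p.2 1)
      else
        d.insert p.1 ((PySem.Dict.empty).insert p.2 1)) PySem.Dict.empty
  output_count.items.foldl (fun result kv =>
    result ++ [(kv.1, kv.2.items.foldl (fun temp p => temp ++ [p]) [])]) []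

-- ===== PORT B =====
def inverted_combiner_alt (output : List (String × String)) : List (String × (List (String × Int))) :=
  let counts : PySem.Dict (String × String) Int :=
    output.foldl (fun d pair => d.insert pair (d.getD pair 0 + 1)) PySem.Dict.empty
  let groups : PySem.Dict String (List (String × Int)) :=
    counts.items.foldl (fun g q => g.modify q.1.1 [] (fun l => l ++ [(q.1.2, q.2)])) PySem.Dict.empty
  groups.items

-- ===== PRECONDITION & SPEC =====
def Spec_inverted_combiner (output : List (String × String)) (out : List (String × (List (String × Int)))) : Prop := out = inverted_combiner_alt output
instance (output : List (String × String)) (out : List (String × (List (String × Int)))) : Decidable (Spec_inverted_combiner output out) := by unfold Spec_inverted_combiner; infer_instance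

-- ===== CLAIM (what is proved, stated in full; the proofs are below) =====
def Claim_equal_inverted_combiner : Prop := ∀ (output : List (String × String)), Dom_inverted_combiner output → Spec_inverted_combiner output (inverted_combiner output)

-- ===== LEMMAS AND PROOFS =====

-- A's loop body, normalised: both branches are an insert of the updated inner counter.
theorem pv_stepA_eq (d : PySem.Dict String (PySem.Dict String Int)) (p : String × String) :
    (if d.contains p.1 then
        if (d.getD p.1 PySem.Dict.empty).contains p.2 then
          d.insert p.1 ((d.getD p.1 PySem.Dict.empty).insert p.2
            ((d.getD p.1 PySem.Dict.empty).getD p.2 0 + 1))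
        else
          d.insert p.1 ((d.getD p.1 PySem.Dict.empty).insert p.2 1)
      else
        d.insert p.1 ((PySem.Dict.empty).insert p.2 1))
      = d.insert p.1 ((d.getD p.1 PySem.Dict.empty).insert p.2
          ((d.getD p.1 PySem.Dict.empty).getD p.2 0 + 1)) := by
  by_cases h : d.contains p.1
  · simp only [h, if_true]
    by_cases h2 : (d.getD p.1 PySem.Dict.empty).contains p.2
    · simp [h2]
    · have hz : (d.getD p.1 PySem.Dict.empty).getD p.2 0 = 0 :=
        PySem.Dict.getD_of_not_contains _ _ (by simpa using h2)
      simp [h2, hz]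
  · have hd : d.getD p.1 PySem.Dict.empty = PySem.Dict.empty :=
      PySem.Dict.getD_of_not_contains _ _ (by simpa using h)
    simp [h, hd, PySem.Dict.getD_empty]

-- getD after a keyed-insert loop: only the entries whose key matches contribute.
theorem pv_getD_foldl_insert_key {kk nu al : Type} [BEq kk] [LawfulBEq kk] [DecidableEq kk]
    (l : List al) (key : al → kk) (g : nu → al → nu) (dflt : nu) (d : PySem.Dict kk nu) (k : kk) :
    (l.foldl (fun d a => d.insert (key a) (g (d.getD (key a) dflt) a)) d).getD k dflt
      = (l.filter (fun a => key a == k)).foldl g (d.getD k dflt) := by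
  induction l generalizing d with
  | nil => rfl
  | cons a l ih =>
    simp only [List.foldl_cons, List.filter_cons]
    rw [ih, PySem.Dict.getD_insert]
    by_cases h : key a = k
    · simp [h]
    · simp [h, Ne.symm h]

-- dedup commutes with map through an earlier dedup.
theorem pv_ofList_map_ofList {al be : Type} [BEq al] [LawfulBEq al] [BEq be] [LawfulBEq be]
    (f : al → be) (l : List al) :
    PySem.Set.ofList ((PySem.Set.ofList l).map f) = PySem.Set.ofList (l.map f) := by
  induction l using List.reverseRecOn with
  | nil => rfl
  | append_singleton l x ih =>
    rw [PySem.Set.ofList_append_singleton, List.map_append, List.map_singleton,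
      PySem.Set.ofList_append_singleton]
    by_cases h : x ∈ PySem.Set.ofList l
    · rw [PySem.Set.add_of_mem h, ih,
        PySem.Set.add_of_mem ((PySem.Set.mem_ofList _ _).2
          (List.mem_map_of_mem ((PySem.Set.mem_ofList _ _).1 h)))]
    · rw [PySem.Set.add_of_not_mem h, List.map_append, List.map_singleton,
        PySem.Set.ofList_append_singleton, ih]

-- dedup of the second components of pairs, filtered to one fixed first component.
theorem pv_ofList_filter_map_snd {al ga : Type} [BEq al] [LawfulBEq al] [BEq ga] [LawfulBEq ga]
    (k : al) (l : List (al × ga)) :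
    ((PySem.Set.ofList l).filter (fun p => p.1 == k)).map Prod.snd
      = PySem.Set.ofList ((l.filter (fun p => p.1 == k)).map Prod.snd) := by
  induction l using List.reverseRecOn with
  | nil => rfl
  | append_singleton l x ih =>
    rw [PySem.Set.ofList_append_singleton]
    by_cases hq : x.1 = k
    · have hf1 : List.filter (fun p => p.1 == k) [x] = [x] := by simp [hq]
      by_cases h : x ∈ PySem.Set.ofList l
      · rw [PySem.Set.add_of_mem h]
        simp only [List.filter_append, hf1, List.map_append, List.map_singleton,
          PySem.Set.ofList_append_singleton, ← ih]
        rw [PySem.Set.add_of_mem (List.mem_map_of_mem (List.mem_filter.2 ⟨h, by simp [hq]⟩))]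
      · rw [PySem.Set.add_of_not_mem h]
        simp only [List.filter_append, hf1, List.map_append, List.map_singleton,
          PySem.Set.ofList_append_singleton, ← ih]
        have hx : x.2 ∉ ((PySem.Set.ofList l).filter (fun p => p.1 == k)).map Prod.snd := by
          intro hc
          rcases List.mem_map.1 hc with ⟨p, hp, hps⟩
          rcases List.mem_filter.1 hp with ⟨hpl, hpk⟩
          have hpx : p = x :=
            Prod.ext ((show p.1 = k by simpa using hpk).trans hq.symm) hps
          exact h (hpx ▸ hpl)
        rw [PySem.Set.add_of_not_mem hx]
    · have hf0 : List.filter (fun p => p.1 == k) [x] = [] := by simp [hq]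
      by_cases h : x ∈ PySem.Set.ofList l
      · rw [PySem.Set.add_of_mem h]
        simp only [List.filter_append, hf0, List.append_nil, ih]
      · rw [PySem.Set.add_of_not_mem h]
        simp only [List.filter_append, hf0, List.append_nil, ih]

-- counting a value among the seconds of the pairs with a fixed first component.
theorem pv_count_snd_filter {al ga : Type} [BEq al] [LawfulBEq al] [BEq ga] [LawfulBEq ga]
    (k : al) (v : ga) (l : List (al × ga)) :
    ((l.filter (fun p => p.1 == k)).map Prod.snd).count v = l.count (k, v) := by
  induction l with
  | nil => rfl
  | cons p l ih =>
    rw [List.filter_cons]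
    by_cases h1 : p.1 = k
    · by_cases h2 : p.2 = v
      · have hp : p = (k, v) := Prod.ext h1 h2
        simp [hp, ih]
      · simp [h1, h2, ih, show p ≠ (k, v) from fun hc => h2 (by rw [hc])]
    · simp [h1, ih, show p ≠ (k, v) from fun hc => h1 (by rw [hc])]

-- the per-key bucket, seen from A's side and from B's side.
theorem pv_body_eq (output : List (String × String)) (k : String) :
    (PySem.Set.ofList ((output.filter (fun p => p.1 == k)).map Prod.snd)).map
        (fun v => (v, (((output.filter (fun p => p.1 == k)).map Prod.snd).count v : Int)))
      = ((PySem.Set.ofList output).filter (fun p => p.1 == k)).map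
          (fun p => (p.2, (output.count p : Int))) := by
  rw [← pv_ofList_filter_map_snd, List.map_map]
  refine List.map_congr_left (fun p hp => ?_)
  have hk : p.1 = k := by simpa using (List.mem_filter.1 hp).2
  simp only [Function.comp]
  rw [pv_count_snd_filter, show ((k, p.2) : String × String) = p from Prod.ext hk.symm rfl]

-- A computes: keys in first-appearance order; per key, the distinct values with their counts.
theorem pv_A_char (output : List (String × String)) :
    inverted_combiner output
      = (PySem.Set.ofList (output.map (fun p => p.1))).map (fun k => (k,
          (PySem.Set.ofList ((output.filter (fun p => p.1 == k)).map Prod.snd)).map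
            (fun v => (v, (((output.filter (fun p => p.1 == k)).map Prod.snd).count v : Int))))) := by
  unfold inverted_combiner
  simp only [pv_stepA_eq, PySem.List.foldl_append_singleton_eq_map, List.nil_append, List.map_id']
  set oc : PySem.Dict String (PySem.Dict String Int) := output.foldl (fun d p => d.insert p.1 ((d.getD p.1 PySem.Dict.empty).insert p.2
      ((d.getD p.1 PySem.Dict.empty).getD p.2 0 + 1))) PySem.Dict.empty with hoc
  have hnd : oc.keys.Nodup := by
    rw [hoc]
    exact PySem.Dict.nodup_keys_foldl_insert_key output (fun p => p.1)
      (fun d p => ((d.getD p.1 PySem.Dict.empty).insert p.2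
        ((d.getD p.1 PySem.Dict.empty).getD p.2 0 + 1)))
      PySem.Dict.empty (by simp [PySem.Dict.keys_empty])
  have hkeys : oc.keys = PySem.Set.ofList (output.map (fun p => p.1)) := by
    rw [hoc]
    exact (PySem.Dict.keys_foldl_insert_key output (fun p => p.1)
      (fun d p => ((d.getD p.1 PySem.Dict.empty).insert p.2
        ((d.getD p.1 PySem.Dict.empty).getD p.2 0 + 1)))
      PySem.Dict.empty).trans (PySem.Set.update_nil_left _)
  have hgd : ∀ k : String, oc.getD k PySem.Dict.empty
      = PySem.Dict.counter ((output.filter (fun p => p.1 == k)).map Prod.snd) := by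
    intro k
    rw [hoc]
    have h1 : (output.foldl (fun d p => d.insert p.1 ((d.getD p.1 PySem.Dict.empty).insert p.2
        ((d.getD p.1 PySem.Dict.empty).getD p.2 0 + 1)))
        (PySem.Dict.empty : PySem.Dict String (PySem.Dict String Int))).getD k PySem.Dict.empty
        = (output.filter (fun p => p.1 == k)).foldl
            (fun (inner : PySem.Dict String Int) p => inner.insert p.2 (inner.getD p.2 0 + 1))
            PySem.Dict.empty := by
      have := pv_getD_foldl_insert_key output (fun p => p.1)
        (fun (inner : PySem.Dict String Int) (p : String × String) =>
          inner.insert p.2 (inner.getD p.2 0 + 1))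
        PySem.Dict.empty PySem.Dict.empty k
      simpa using this
    have h2 : (output.filter (fun p => p.1 == k)).foldl
        (fun (inner : PySem.Dict String Int) (p : String × String) =>
          inner.insert p.2 (inner.getD p.2 0 + 1)) PySem.Dict.empty
        = ((output.filter (fun p => p.1 == k)).map Prod.snd).foldl
          (fun (inner : PySem.Dict String Int) v =>
            inner.insert v (inner.getD v 0 + 1)) PySem.Dict.empty :=
      (List.foldl_map (f := Prod.snd)
        (g := fun (inner : PySem.Dict String Int) v => inner.insert v (inner.getD v 0 + 1))).symm
    exact h1.trans (h2.trans
      (PySem.Dict.foldl_insert_getD_add_one_eq_counter _))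
  rw [PySem.Dict.items_eq_map_keys oc hnd PySem.Dict.empty, hkeys, List.map_map]
  refine List.map_congr_left (fun k _ => ?_)
  simp only [Function.comp]
  rw [hgd k, PySem.Dict.items_counter]

-- B computes the same shape from the flat counter.
theorem pv_B_char (output : List (String × String)) :
    inverted_combiner_alt output
      = (PySem.Set.ofList ((PySem.Set.ofList output).map (fun p => p.1))).map (fun k => (k,
          ((PySem.Set.ofList output).filter (fun p => p.1 == k)).map
            (fun p => (p.2, (output.count p : Int))))) := by
  unfold inverted_combiner_alt
  simp only [PySem.Dict.foldl_insert_getD_add_one_eq_counter]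
  have hre : (PySem.Dict.counter output).items.foldl
      (fun (g : PySem.Dict String (List (String × Int))) (q : (String × String) × Int) =>
        g.modify q.1.1 [] (fun l => l ++ [(q.1.2, q.2)])) PySem.Dict.empty
      = ((PySem.Dict.counter output).items.map (fun (q : (String × String) × Int) =>
          (q.1.1, (q.1.2, q.2)))).foldl
        (fun (d : PySem.Dict String (List (String × Int))) (p : String × (String × Int)) =>
          d.modify p.1 [] (fun x => x ++ [p.2])) PySem.Dict.empty :=
    (List.foldl_map (f := fun (q : (String × String) × Int) => (q.1.1, (q.1.2, q.2)))
      (g := fun (d : PySem.Dict String (List (String × Int))) (p : String × (String × Int)) =>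
        d.modify p.1 [] (fun x => x ++ [p.2]))).symm
  rw [hre]
  set M := (PySem.Dict.counter output).items.map (fun (q : (String × String) × Int) =>
    (q.1.1, (q.1.2, q.2))) with hM
  set grp := M.foldl (fun (d : PySem.Dict String (List (String × Int)))
    (p : String × (String × Int)) =>
    d.modify p.1 [] (fun x => x ++ [p.2])) PySem.Dict.empty with hgrp
  have hnd : grp.keys.Nodup := by
    rw [hgrp]
    exact PySem.Dict.nodup_keys_foldl_modify_key M (fun p => p.1) []
      (fun _ p => fun x => x ++ [p.2]) PySem.Dict.empty (by simp [PySem.Dict.keys_empty])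
  have hkeys : grp.keys = PySem.Set.ofList ((PySem.Set.ofList output).map (fun p => p.1)) := by
    have h2 : PySem.Set.update ([] : List String) (M.map (fun p => p.1))
        = PySem.Set.ofList ((PySem.Set.ofList output).map (fun p => p.1)) := by
      rw [PySem.Set.update_nil_left, hM, PySem.Dict.items_counter]
      simp [List.map_map, Function.comp_def]
    rw [hgrp]
    exact (PySem.Dict.keys_foldl_modify_key M (fun p => p.1) []
      (fun _ p => fun x => x ++ [p.2]) PySem.Dict.empty).trans h2
  have hgd : ∀ k : String, grp.getD k []
      = ((PySem.Set.ofList output).filter (fun p => p.1 == k)).map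
          (fun p => (p.2, (output.count p : Int))) := by
    intro k
    rw [hgrp, PySem.Dict.getD_foldl_modify_append M PySem.Dict.empty k, hM,
      PySem.Dict.items_counter]
    simp [List.map_map, List.filter_map, Function.comp_def]
  rw [PySem.Dict.items_eq_map_keys grp hnd ([] : List (String × Int)), hkeys]
  refine List.map_congr_left (fun k _ => ?_)
  rw [hgd k]

theorem pv_main (output : List (String × String)) :
    inverted_combiner output = inverted_combiner_alt output := by
  rw [pv_A_char, pv_B_char, pv_ofList_map_ofList]
  exact List.map_congr_left (fun k _ => by rw [pv_body_eq])

-- ===== VERDICT (by name: the statement is the Claim_ definition above) =====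
theorem inverted_combiner_spec : Claim_equal_inverted_combiner := by
  intro output _
  show inverted_combiner output = inverted_combiner_alt output
  exact pv_main output
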